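-- pv_equiv track=rewrite | github.com/koba925/alds | atcoder/ABC238/D.py | and_and_sum_mine
-- ===== SOURCE A (Python) =====
-- def to_bin(n):
--     b = []
--     while n > 0:
--         b.append(n % 2)
--         n //= 2
--     return b
--
-- def and_and_sum_mine(a, s):
--     ba, bs = to_bin(a), to_bin(s)
--     la, ls = len(ba), len(bs)
--     if la != 0 and ls < la + 1:
--         return False
--     ba += [0] * (ls - la)
--     carry = 0
--     for i in range(ls):
--         if ba[i] == 1:
--             if (carry == 0 and bs[i] == 1) or (carry == 1 and bs[i] == 0) :
--                 return False
--             carry = 1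
--         else:
--             carry = 1 if carry == 1 and bs[i] == 0 else 0
--     return True
-- ===== SOURCE B (Python) =====
-- def and_and_sum_mine(a, s):
--     # x & y == a and x + y == s is feasible iff x ^ y = s - 2*a is a
--     # nonnegative number bit-disjoint from a (for a <= 0 A always says True).
--     return a <= 0 or (s >= 2 * a and (s - 2 * a) & a == 0)
-- ===== Notes on version B (the rewrite author's own statement) =====
-- stated objective: simpler
-- what changed: Replaces to_bin plus the bit-by-bit carry-simulation loop with the one-line closed-form test a <= 0 or (s >= 2*a and (s - 2*a) & a == 0), using x + y = 2*(x&y) + (x^y) and that the xor part must be bit-disjoint from a.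
import Mathlib
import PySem

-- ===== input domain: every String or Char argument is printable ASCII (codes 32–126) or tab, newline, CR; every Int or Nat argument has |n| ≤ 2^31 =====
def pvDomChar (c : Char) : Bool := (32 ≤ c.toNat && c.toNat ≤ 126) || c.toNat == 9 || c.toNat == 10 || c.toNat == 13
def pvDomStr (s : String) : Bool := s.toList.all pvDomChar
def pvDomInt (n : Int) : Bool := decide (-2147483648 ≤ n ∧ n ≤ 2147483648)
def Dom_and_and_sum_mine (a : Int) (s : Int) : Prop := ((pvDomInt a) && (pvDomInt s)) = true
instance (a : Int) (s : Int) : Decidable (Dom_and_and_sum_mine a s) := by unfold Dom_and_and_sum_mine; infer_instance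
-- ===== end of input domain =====

-- B replaces A's to_bin + bit-by-bit carry loop by the closed-form test
-- a <= 0 or (s >= 2*a and (s - 2*a) & a == 0); proved to return A's exact value.

-- ===== PORT A =====
-- port of helper to_bin: b = []; while n > 0: b.append(n % 2); n //= 2
def to_bin (n : Int) : List Int :=
  if h : 0 < n then PySem.Int.mod n 2 :: to_bin (PySem.Int.floordiv n 2) else []
termination_by n.toNat
decreasing_by
  rw [PySem.Int.floordiv_eq_ediv_of_pos (by omega : (0:Int) < 2)]
  omega

-- the `for i in range(ls)` loop of A, walking the (equal-length) bit lists with the carry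
def aLoop : List Int → List Int → Int → Bool
  | x :: ba, y :: bs, carry =>
    if x == 1 then
      if (carry == 0 && y == 1) || (carry == 1 && y == 0) then false
      else aLoop ba bs 1
    else aLoop ba bs (if carry == 1 && y == 0 then 1 else 0)
  | _, _, _ => true

def and_and_sum_mine (a : Int) (s : Int) : Bool :=
  let ba := to_bin a
  let bs := to_bin s
  let la := ba.length
  let ls := bs.length
  if la ≠ 0 ∧ ls < la + 1 then false
  else aLoop (ba ++ List.replicate (ls - la) 0) bs 0

-- ===== PORT B =====
def and_and_sum_mine_alt (a : Int) (s : Int) : Bool :=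
  decide (a ≤ 0) || (decide (2 * a ≤ s) && decide (Int.land (s - 2 * a) a = 0))

-- ===== PRECONDITION & SPEC =====
def Spec_and_and_sum_mine (a : Int) (s : Int) (out : Bool) : Prop := out = and_and_sum_mine_alt a s
instance (a : Int) (s : Int) (out : Bool) : Decidable (Spec_and_and_sum_mine a s out) := by unfold Spec_and_and_sum_mine; infer_instance

-- ===== CLAIM (what is proved, stated in full; the proofs are below) =====
def Claim_equal_and_and_sum_mine : Prop := ∀ (a : Int) (s : Int), Dom_and_and_sum_mine a s → Spec_and_and_sum_mine a s (and_and_sum_mine a s)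

-- ===== LEMMAS AND PROOFS =====

-- value of a little-endian bit list
def bval : List Int → Int
  | [] => 0
  | x :: l => x + 2 * bval l

theorem to_bin_nonpos {n : Int} (h : n ≤ 0) : to_bin n = [] := by
  unfold to_bin; simp [show ¬ (0 < n) by omega]

theorem mod_two_01 (n : Int) : PySem.Int.mod n 2 = 0 ∨ PySem.Int.mod n 2 = 1 := by
  rw [PySem.Int.mod_eq_emod_of_pos (by omega : (0:Int) < 2)]
  omega

theorem to_bin_bits01 (n : Int) : ∀ b ∈ to_bin n, b = 0 ∨ b = 1 := by
  fun_induction to_bin n with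
  | case1 n h ih =>
    intro b hb
    rcases List.mem_cons.1 hb with rfl | hb
    · exact mod_two_01 n
    · exact ih b hb
  | case2 n h => simp

theorem floordiv_two_facts (n : Int) (h : 0 < n) :
    0 ≤ PySem.Int.floordiv n 2 ∧ 2 * PySem.Int.floordiv n 2 ≤ n ∧
      PySem.Int.mod n 2 + 2 * PySem.Int.floordiv n 2 = n := by
  rw [PySem.Int.floordiv_eq_ediv_of_pos (by omega : (0:Int) < 2),
      PySem.Int.mod_eq_emod_of_pos (by omega : (0:Int) < 2)]
  omega

theorem bval_to_bin {n : Int} (h : 0 ≤ n) : bval (to_bin n) = n := by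
  fun_induction to_bin n with
  | case1 n h' ih =>
    obtain ⟨h1, h2, h3⟩ := floordiv_two_facts n h'
    simp only [bval, ih h1]
    omega
  | case2 n h' => simp only [bval]; omega

theorem to_bin_lt {n : Int} (h : 0 ≤ n) : n < 2 ^ (to_bin n).length := by
  fun_induction to_bin n with
  | case1 n h' ih =>
    obtain ⟨h1, h2, h3⟩ := floordiv_two_facts n h'
    have := ih h1
    have hm := mod_two_01 n
    simp only [List.length_cons, pow_succ]
    omega
  | case2 n h' => simp only [List.length_nil, pow_zero]; omega

theorem to_bin_ne_nil {n : Int} (h : 0 < n) : to_bin n ≠ [] := by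
  unfold to_bin; simp [h]

theorem to_bin_le {n : Int} (h : 0 < n) : 2 ^ ((to_bin n).length - 1) ≤ n := by
  fun_induction to_bin n with
  | case1 n h' ih =>
    obtain ⟨h1, h2, h3⟩ := floordiv_two_facts n h'
    by_cases hm : 0 < PySem.Int.floordiv n 2
    · have hle := ih hm
      have hne : (to_bin (PySem.Int.floordiv n 2)).length ≠ 0 := by
        exact fun h0 => (to_bin_ne_nil hm) (List.length_eq_zero_iff.1 h0)
      obtain ⟨k, hk⟩ : ∃ k, (to_bin (PySem.Int.floordiv n 2)).length = k + 1 :=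
        ⟨(to_bin (PySem.Int.floordiv n 2)).length - 1, by omega⟩
      rw [List.length_cons, hk]
      rw [hk, Nat.add_sub_cancel] at hle
      have h2p : (2:Int) ^ (k + 1 + 1 - 1) = 2 * 2 ^ k := by
        rw [Nat.add_sub_cancel, pow_succ]; ring
      rw [h2p]
      omega
    · have hnil : to_bin (PySem.Int.floordiv n 2) = [] := to_bin_nonpos (by omega)
      rw [hnil]
      simp only [List.length_cons, List.length_nil, Nat.add_sub_cancel, pow_zero]
      omega
  | case2 n h' => exact absurd h h'

theorem bval_nonneg {l : List Int} (h : ∀ b ∈ l, b = 0 ∨ b = 1) : 0 ≤ bval l := by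
  induction l with
  | nil => simp [bval]
  | cons x l ih =>
    have hx := h x (by simp)
    have := ih (fun b hb => h b (by simp [hb]))
    simp only [bval]; omega

theorem bval_append_zeros (l : List Int) (k : Nat) : bval (l ++ List.replicate k 0) = bval l := by
  induction l with
  | nil =>
    simp only [List.nil_append, bval]
    induction k with
    | zero => simp [bval]
    | succ k ih => simpa [bval, List.replicate_succ] using ih
  | cons x l ih => simp [bval, ih]

theorem aLoop_zeros (bs : List Int) : aLoop (List.replicate bs.length 0) bs 0 = true := by
  induction bs with
  | nil => simp [aLoop]
  | cons y bs ih => simpa [aLoop, List.replicate_succ] using ih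

theorem int_land_natCast (m k : Nat) : Int.land (↑m) (↑k) = ↑(m &&& k) := rfl

theorem int_land_nonneg {m k : Int} (hm : 0 ≤ m) (hk : 0 ≤ k) : 0 ≤ Int.land m k := by
  obtain ⟨m', rfl⟩ := Int.eq_ofNat_of_zero_le hm
  obtain ⟨k', rfl⟩ := Int.eq_ofNat_of_zero_le hk
  rw [int_land_natCast]; exact Int.natCast_nonneg _

theorem land_bit' (b1 b2 : Bool) (E A : Int) :
    Int.land ((if b1 then 1 else 0) + 2 * E) ((if b2 then 1 else 0) + 2 * A)
      = (if (b1 && b2) then 1 else 0) + 2 * Int.land E A := by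
  have h := Int.land_bit b1 E b2 A
  simp only [Int.bit_val] at h
  cases b1 <;> cases b2 <;> simpa [add_comm] using h

theorem land_split {e0 x E A : Int} (he : e0 = 0 ∨ e0 = 1) (hx : x = 0 ∨ x = 1)
    (hE : 0 ≤ E) (hA : 0 ≤ A) :
    (Int.land (e0 + 2 * E) (x + 2 * A) = 0) ↔ (¬(e0 = 1 ∧ x = 1) ∧ Int.land E A = 0) := by
  have hnn := int_land_nonneg hE hA
  rcases he with rfl | rfl <;> rcases hx with rfl | rfl
  · have h : Int.land (0 + 2 * E) (0 + 2 * A) = 0 + 2 * Int.land E A := by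
      simpa using land_bit' false false E A
    rw [h]; omega
  · have h : Int.land (0 + 2 * E) (1 + 2 * A) = 0 + 2 * Int.land E A := by
      simpa using land_bit' false true E A
    rw [h]; omega
  · have h : Int.land (1 + 2 * E) (0 + 2 * A) = 0 + 2 * Int.land E A := by
      simpa using land_bit' true false E A
    rw [h]; omega
  · have h : Int.land (1 + 2 * E) (1 + 2 * A) = 1 + 2 * Int.land E A := by
      simpa using land_bit' true true E A
    rw [h]; omega

theorem emod_bit {e0 k M : Int} (hM : 0 < M) (he : e0 = 0 ∨ e0 = 1) :
    (e0 + 2 * k) % (2 * M) = e0 + 2 * (k % M) := by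
  have h1 : 0 ≤ k % M := Int.emod_nonneg k (by omega)
  have h2 : k % M < M := Int.emod_lt_of_pos k hM
  have key : e0 + 2 * k = (e0 + 2 * (k % M)) + (2 * M) * (k / M) := by
    rw [Int.emod_def]; ring
  rw [key, Int.add_mul_emod_self_left, Int.emod_eq_of_lt (by omega) (by omega)]

theorem aLoop_iff : ∀ (ba bs : List Int) (c : Int),
    ba.length = bs.length → (∀ b ∈ ba, b = 0 ∨ b = 1) → (∀ b ∈ bs, b = 0 ∨ b = 1) →
    (c = 0 ∨ c = 1) →
    (aLoop ba bs c = true ↔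
      Int.land ((bval bs - 2 * bval ba - c) % (2 ^ ba.length)) (bval ba) = 0) := by
  intro ba
  induction ba with
  | nil =>
    intro bs c hlen hba hbs hc
    have hnil : bs = [] := List.eq_nil_of_length_eq_zero hlen.symm
    subst hnil
    have hz0 : Int.land 0 0 = 0 := by decide
    simp [aLoop, bval, hz0]
  | cons x ba ih =>
    intro bs c hlen hba hbs hc
    cases bs with
    | nil => simp at hlen
    | cons y bs =>
      have hx := hba x (by simp)
      have hy := hbs y (by simp)
      have hba' : ∀ b ∈ ba, b = 0 ∨ b = 1 := fun b hb => hba b (by simp [hb])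
      have hbs' : ∀ b ∈ bs, b = 0 ∨ b = 1 := fun b hb => hbs b (by simp [hb])
      have hlen' : ba.length = bs.length := by simpa using hlen
      have hA' : 0 ≤ bval ba := bval_nonneg hba'
      have hM : (0:Int) < 2 ^ ba.length := by positivity
      have hEk : ∀ k : Int, 0 ≤ k % 2 ^ ba.length := fun k => Int.emod_nonneg k (by positivity)
      have hpow : (2:Int) ^ (x :: ba).length = 2 * 2 ^ ba.length := by
        rw [List.length_cons, pow_succ]; ring
      have hA : bval (x :: ba) = x + 2 * bval ba := rfl
      rcases hx with rfl | rfl <;> rcases hy with rfl | rfl <;> rcases hc with rfl | rfl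
      · -- x=0, y=0, c=0
        have hd : bval (0 :: bs) - 2 * bval (0 :: ba) - 0 = 0 + 2 * (bval bs - 2 * bval ba - 0) := by
          simp only [bval]; ring
        rw [hpow, hd, hA, emod_bit hM (Or.inl rfl),
            land_split (Or.inl rfl) (Or.inl rfl) (hEk _) hA']
        have hrec := ih bs 0 hlen' hba' hbs' (Or.inl rfl)
        simp [aLoop, hrec]
      · -- x=0, y=0, c=1
        have hd : bval (0 :: bs) - 2 * bval (0 :: ba) - 1 = 1 + 2 * (bval bs - 2 * bval ba - 1) := by
          simp only [bval]; ring
        rw [hpow, hd, hA, emod_bit hM (Or.inr rfl),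
            land_split (Or.inr rfl) (Or.inl rfl) (hEk _) hA']
        have hrec := ih bs 1 hlen' hba' hbs' (Or.inr rfl)
        simp [aLoop, hrec]
      · -- x=0, y=1, c=0
        have hd : bval (1 :: bs) - 2 * bval (0 :: ba) - 0 = 1 + 2 * (bval bs - 2 * bval ba - 0) := by
          simp only [bval]; ring
        rw [hpow, hd, hA, emod_bit hM (Or.inr rfl),
            land_split (Or.inr rfl) (Or.inl rfl) (hEk _) hA']
        have hrec := ih bs 0 hlen' hba' hbs' (Or.inl rfl)
        simp [aLoop, hrec]
      · -- x=0, y=1, c=1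
        have hd : bval (1 :: bs) - 2 * bval (0 :: ba) - 1 = 0 + 2 * (bval bs - 2 * bval ba - 0) := by
          simp only [bval]; ring
        rw [hpow, hd, hA, emod_bit hM (Or.inl rfl),
            land_split (Or.inl rfl) (Or.inl rfl) (hEk _) hA']
        have hrec := ih bs 0 hlen' hba' hbs' (Or.inl rfl)
        simp [aLoop, hrec]
      · -- x=1, y=0, c=0
        have hd : bval (0 :: bs) - 2 * bval (1 :: ba) - 0 = 0 + 2 * (bval bs - 2 * bval ba - 1) := by
          simp only [bval]; ring
        rw [hpow, hd, hA, emod_bit hM (Or.inl rfl),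
            land_split (Or.inl rfl) (Or.inr rfl) (hEk _) hA']
        have hrec := ih bs 1 hlen' hba' hbs' (Or.inr rfl)
        simp [aLoop, hrec]
      · -- x=1, y=0, c=1
        have hd : bval (0 :: bs) - 2 * bval (1 :: ba) - 1 = 1 + 2 * (bval bs - 2 * bval ba - 2) := by
          simp only [bval]; ring
        rw [hpow, hd, hA, emod_bit hM (Or.inr rfl),
            land_split (Or.inr rfl) (Or.inr rfl) (hEk _) hA']
        simp [aLoop]
      · -- x=1, y=1, c=0
        have hd : bval (1 :: bs) - 2 * bval (1 :: ba) - 0 = 1 + 2 * (bval bs - 2 * bval ba - 1) := by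
          simp only [bval]; ring
        rw [hpow, hd, hA, emod_bit hM (Or.inr rfl),
            land_split (Or.inr rfl) (Or.inr rfl) (hEk _) hA']
        simp [aLoop]
      · -- x=1, y=1, c=1
        have hd : bval (1 :: bs) - 2 * bval (1 :: ba) - 1 = 0 + 2 * (bval bs - 2 * bval ba - 1) := by
          simp only [bval]; ring
        rw [hpow, hd, hA, emod_bit hM (Or.inl rfl),
            land_split (Or.inl rfl) (Or.inr rfl) (hEk _) hA']
        have hrec := ih bs 1 hlen' hba' hbs' (Or.inr rfl)
        simp [aLoop, hrec]

theorem nat_disjoint_add_lt : ∀ (w m k : Nat), m < 2 ^ w → k < 2 ^ w → m &&& k = 0 → m + k < 2 ^ w := by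
  intro w
  induction w with
  | zero => intro m k hm hk _; simp only [pow_zero] at *; omega
  | succ w ih =>
    intro m k hm hk h0
    have hbit : ¬(m % 2 = 1 ∧ k % 2 = 1) := by
      intro ⟨h1, h2⟩
      have t0 := congrArg (fun z => z.testBit 0) h0
      simp only [Nat.testBit_land, Nat.zero_testBit] at t0
      rw [Nat.testBit_zero, Nat.testBit_zero] at t0
      simp [h1, h2] at t0
    have hrec : (m / 2) &&& (k / 2) = 0 := by
      apply Nat.eq_of_testBit_eq
      intro i
      have ti := congrArg (fun z => z.testBit (i + 1)) h0
      simp only [Nat.testBit_land, Nat.zero_testBit] at ti ⊢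
      rw [Nat.testBit_add_one, Nat.testBit_add_one] at ti
      exact ti
    have hp : 2 ^ (w + 1) = 2 * 2 ^ w := by rw [pow_succ]; ring
    have ihh := ih (m / 2) (k / 2) (by omega) (by omega) hrec
    omega

theorem pow_le_pow_int {p q : Nat} (h : p ≤ q) : (2:Int) ^ p ≤ 2 ^ q :=
  pow_le_pow_right₀ (by omega) h

theorem main_eq (a s : Int) : and_and_sum_mine a s = and_and_sum_mine_alt a s := by
  unfold and_and_sum_mine and_and_sum_mine_alt
  by_cases ha : a ≤ 0
  · rw [to_bin_nonpos ha]
    simp only [List.length_nil, ne_eq, not_true_eq_false, false_and, if_false,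
      Nat.sub_zero, List.nil_append]
    simp [aLoop_zeros, ha]
  · have ha' : 0 < a := by omega
    by_cases hs : s ≤ 0
    · rw [to_bin_nonpos hs]
      have hne : (to_bin a).length ≠ 0 :=
        fun h0 => (to_bin_ne_nil ha') (List.length_eq_zero_iff.1 h0)
      simp only [List.length_nil]
      rw [if_pos ⟨hne, by omega⟩]
      have h2a : ¬ (2 * a ≤ s) := by omega
      simp [ha, h2a]
    · have hs' : 0 < s := by omega
      have hval_a : bval (to_bin a) = a := bval_to_bin (by omega)
      have hval_s : bval (to_bin s) = s := bval_to_bin (by omega)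
      have hlt_a : a < 2 ^ (to_bin a).length := to_bin_lt (by omega)
      have hlt_s : s < 2 ^ (to_bin s).length := to_bin_lt (by omega)
      have hle_a : 2 ^ ((to_bin a).length - 1) ≤ a := to_bin_le ha'
      have hle_s : 2 ^ ((to_bin s).length - 1) ≤ s := to_bin_le hs'
      have hne_a : (to_bin a).length ≠ 0 :=
        fun h0 => (to_bin_ne_nil ha') (List.length_eq_zero_iff.1 h0)
      have hne_s : (to_bin s).length ≠ 0 :=
        fun h0 => (to_bin_ne_nil hs') (List.length_eq_zero_iff.1 h0)
      set la := (to_bin a).length with hla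
      set ls := (to_bin s).length with hls
      by_cases hguard : ls < la + 1
      · -- s has too few bits: A returns False; B: s < 2a
        rw [if_pos ⟨hne_a, hguard⟩]
        have h1 : (2:Int) ^ ls ≤ 2 ^ la := pow_le_pow_int (by omega)
        have h2 : (2:Int) ^ la = 2 * 2 ^ (la - 1) := by
          conv_lhs => rw [show la = (la - 1) + 1 by omega]
          rw [pow_succ]; ring
        have h2a : ¬ (2 * a ≤ s) := by omega
        simp [ha, h2a]
      · -- main case: ls ≥ la + 1
        rw [if_neg (by omega)]
        have hlale : la ≤ ls := by omega
        have hplen : (to_bin a ++ List.replicate (ls - la) (0:Int)).length = ls := by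
          simp [List.length_append, List.length_replicate]; omega
        have hpbits : ∀ b ∈ to_bin a ++ List.replicate (ls - la) (0:Int), b = 0 ∨ b = 1 := by
          intro b hb
          rcases List.mem_append.1 hb with hb | hb
          · exact to_bin_bits01 a b hb
          · left; exact List.eq_of_mem_replicate hb
        have hpval : bval (to_bin a ++ List.replicate (ls - la) (0:Int)) = a := by
          rw [bval_append_zeros, hval_a]
        have happ := aLoop_iff (to_bin a ++ List.replicate (ls - la) (0:Int)) (to_bin s) 0
          (by rw [hplen]) hpbits (to_bin_bits01 s) (Or.inl rfl)
        rw [hpval, hval_s, hplen] at happ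
        have hpow_ls : (2:Int) ^ ls = 2 * 2 ^ (ls - 1) := by
          conv_lhs => rw [show ls = (ls - 1) + 1 by omega]
          rw [pow_succ]; ring
        have hcast : ((2:Int) ^ ls) = ((2 ^ ls : Nat) : Int) := by push_cast; ring
        by_cases h2a : 2 * a ≤ s
        · -- closed form: the residue is s - 2a itself
          have hE : (s - 2 * a - 0) % 2 ^ ls = s - 2 * a := by
            rw [show s - 2 * a - 0 = s - 2 * a by ring]
            apply Int.emod_eq_of_lt <;> omega
          rw [hE] at happ
          by_cases hP : Int.land (s - 2 * a) a = 0
          · rw [happ.2 hP]; simp [ha, h2a, hP]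
          · have : aLoop (to_bin a ++ List.replicate (ls - la) 0) (to_bin s) 0 = false := by
              rw [← Bool.not_eq_true, happ]; exact hP
            rw [this]; simp [ha, hP]
        · -- s < 2a: A's loop must reject
          have hlt2a : s < 2 * a := by omega
          have h1 : (2:Int) ^ (la - 1) ≤ 2 ^ (ls - 1) := pow_le_pow_int (by omega)
          have h2 : (2:Int) ^ la ≤ 2 ^ (ls - 1) := pow_le_pow_int (by omega)
          have h2la : (2:Int) ^ la = 2 * 2 ^ (la - 1) := by
            conv_lhs => rw [show la = (la - 1) + 1 by omega]
            rw [pow_succ]; ring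
          have has : a < s := by omega
          have hE : (s - 2 * a - 0) % 2 ^ ls = s - 2 * a + 2 ^ ls := by
            rw [show s - 2 * a - 0 = (s - 2 * a + 2 ^ ls) + 2 ^ ls * (-1) by ring,
              Int.add_mul_emod_self_left]
            apply Int.emod_eq_of_lt <;> omega
          rw [hE] at happ
          have hfalse : aLoop (to_bin a ++ List.replicate (ls - la) 0) (to_bin s) 0 = false := by
            rw [← Bool.not_eq_true, happ]
            intro hland
            -- move to Nat and use disjointness
            have hEnn : 0 ≤ s - 2 * a + 2 ^ ls := by omega
            obtain ⟨m, hm⟩ := Int.eq_ofNat_of_zero_le hEnn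
            obtain ⟨n, hn⟩ := Int.eq_ofNat_of_zero_le (le_of_lt ha')
            rw [hm, hn, int_land_natCast] at hland
            have hmk : m &&& n = 0 := by exact_mod_cast hland
            have hmlt : m < 2 ^ ls := by
              have : (m : Int) < ((2 ^ ls : Nat) : Int) := by rw [← hm, ← hcast]; omega
              exact_mod_cast this
            have hnlt : n < 2 ^ ls := by
              have h3 : (2:Int) ^ la ≤ 2 ^ ls := pow_le_pow_int (by omega)
              have : (n : Int) < ((2 ^ ls : Nat) : Int) := by rw [← hn, ← hcast]; omega
              exact_mod_cast this
            have hsum := nat_disjoint_add_lt ls m n hmlt hnlt hmk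
            have : (m : Int) + (n : Int) < ((2 ^ ls : Nat) : Int) := by exact_mod_cast hsum
            rw [← hm, ← hn, ← hcast] at this
            omega
          rw [hfalse]
          simp [ha, h2a]

-- ===== VERDICT (by name: the statement is the Claim_ definition above) =====
theorem and_and_sum_mine_spec : Claim_equal_and_and_sum_mine := by
  intro a s _
  unfold Spec_and_and_sum_mine
  exact main_eq a s
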